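-- pv_equiv track=rewrite | github.com/FabianTrapman/MasterMind | Interactions.py | npc_question
-- ===== SOURCE A (Python) =====
-- def pc_question(question_list, answer_code):
--
--     '''
--     When this function is called upon, it checks wether the player's question is correct
--
--     Args: a list wich consists of four colors
--            the secret code
--
--     returns:
--         list: white_pins: correct GIVEN colors, black_pins: correct PLACED colors
--     '''
--
--     list_check = []
--
--     for i in range(len(answer_code)):
--         if answer_code[i] == question_list[i]:
--             list_check.append('black')
--         elif answer_code[i] in question_list:
--             list_check.append('white')
--         else:
--             'niks'
--
--     return sorted(list_check)
--
-- def npc_question(question_list, code):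
--     '''
--     When this function is called upon, it checks wether the computer's question is correct
--
--     Args: a list wich consists of four colors
--            the secret code
--
--     returns:
--         list: white_pins: correct GIVEN colors, black_pins: correct PLACED colors
--     '''
--
--     white, black = 0, 0
--
--     for pin in pc_question(question_list, code):
--         if pin == 'white':
--             white += 1
--         else:
--             black += 1
--
--     return [str(black), str(white)]
-- ===== SOURCE B (Python) =====
-- def npc_question(question_list, code):
--     # black = exact position matches; white = (colours of `code` present anywhere
--     # in question_list) minus black.  Correct because whenever code[i] == question_list[i]
--     # the colour is certainly present in question_list, so the membership count
--     # equals black + white; no per-position membership-with-inequality test, no sort.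
--     qset = set(question_list)
--     hits = sum(c in qset for c in code)
--     black = sum(c == q for c, q in zip(code, question_list))
--     return [str(black), str(hits - black)]
-- ===== Notes on version B (the rewrite author's own statement) =====
-- stated objective: faster
-- what changed: B never classifies a position as white at all: it counts exact matches (black) and counts how many code colours appear anywhere in set(question_list), then derives white as the difference, relying on the fact that an exact match always implies membership; A instead builds a labelled 'black'/'white' list per position, sorts it, and re-counts it in a second loop.
import Mathlib
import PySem

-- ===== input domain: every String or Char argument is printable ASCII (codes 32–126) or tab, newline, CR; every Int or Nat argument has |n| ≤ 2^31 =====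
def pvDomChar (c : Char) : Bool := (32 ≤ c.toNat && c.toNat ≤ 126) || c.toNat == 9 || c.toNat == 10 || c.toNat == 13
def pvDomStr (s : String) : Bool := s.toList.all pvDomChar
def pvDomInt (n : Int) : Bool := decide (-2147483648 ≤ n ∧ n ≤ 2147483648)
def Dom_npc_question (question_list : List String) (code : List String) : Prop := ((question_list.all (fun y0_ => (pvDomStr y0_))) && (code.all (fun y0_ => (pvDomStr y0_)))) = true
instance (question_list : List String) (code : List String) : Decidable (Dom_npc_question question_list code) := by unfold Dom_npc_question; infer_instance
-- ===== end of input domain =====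

-- B counts black (exact matches) and the membership count of code colours in set(question_list),
-- and derives white = membership count - black (an exact match implies membership); no label list, no sort.

-- ===== PORT A =====
-- helper pc_question: builds the 'black'/'white' label list over range(len(answer_code)), then sorts it
def pc_question (question_list : List String) (answer_code : List String) : List String :=
  PySem.List.sorted
    ((PySem.List.pyRange 0 (answer_code.length : Int) 1).foldl
      (fun list_check i =>
        if PySem.List.pyGetD answer_code i "" == PySem.List.pyGetD question_list i "" then
          list_check ++ ["black"]
        else if question_list.contains (PySem.List.pyGetD answer_code i "") then
          list_check ++ ["white"]
        else list_check)
      [])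
    (fun x => x) false

def npc_question (question_list : List String) (code : List String) : List String :=
  let wb := (pc_question question_list code).foldl
    (fun (wb : Int × Int) pin => if pin == "white" then (wb.1 + 1, wb.2) else (wb.1, wb.2 + 1))
    (0, 0)
  [PySem.Int.toStr wb.2, PySem.Int.toStr wb.1]

-- ===== PORT B =====
def npc_question_alt (question_list : List String) (code : List String) : List String :=
  let qset : PySem.Set String := PySem.Set.ofList question_list
  let hits : Int := (code.countP (fun c => PySem.Set.contains qset c) : Nat)
  let black : Int := ((code.zip question_list).countP (fun p => p.1 == p.2) : Nat)
  [PySem.Int.toStr black, PySem.Int.toStr (hits - black)]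

-- ===== PRECONDITION & SPEC =====
-- Pre_ excludes exactly the inputs where A raises IndexError (question_list shorter than code).
def Pre_npc_question (question_list : List String) (code : List String) : Prop :=
  code.length ≤ question_list.length
instance (question_list : List String) (code : List String) : Decidable (Pre_npc_question question_list code) := by unfold Pre_npc_question; infer_instance

def pvWitness_npc_question : List String × List String := (["red", "blue", "red"], ["red", "green"])

def Spec_npc_question (question_list : List String) (code : List String) (out : List String) : Prop := out = npc_question_alt question_list code
instance (question_list : List String) (code : List String) (out : List String) : Decidable (Spec_npc_question question_list code out) := by unfold Spec_npc_question; infer_instance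

-- ===== CLAIM (what is proved, stated in full; the proofs are below) =====
def Claim_equal_npc_question : Prop := ∀ (question_list : List String) (code : List String), Dom_npc_question question_list code → Pre_npc_question question_list code → Spec_npc_question question_list code (npc_question question_list code)

-- ===== LEMMAS AND PROOFS =====

-- A's index-loop body, and the same step expressed on a (code[i], question_list[i]) pair
def aStep (question_list answer_code : List String) (acc : List String) (i : Int) : List String :=
  if PySem.List.pyGetD answer_code i "" == PySem.List.pyGetD question_list i "" then acc ++ ["black"]
  else if question_list.contains (PySem.List.pyGetD answer_code i "") then acc ++ ["white"]
  else acc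

def zStep (question_list : List String) (acc : List String) (p : String × String) : List String :=
  if p.1 == p.2 then acc ++ ["black"]
  else if question_list.contains p.1 then acc ++ ["white"]
  else acc

lemma aFold_eq_zFold_take (question_list answer_code : List String)
    (hlen : answer_code.length ≤ question_list.length) :
    ∀ n, n ≤ answer_code.length →
      (PySem.List.pyRange 0 (n : Int) 1).foldl (aStep question_list answer_code) []
        = ((answer_code.zip question_list).take n).foldl (zStep question_list) [] := by
  intro n
  induction n with
  | zero => intro _; simp [PySem.List.pyRange_one_eq_nil]
  | succ n ih =>
    intro hn
    have hn' : n ≤ answer_code.length := Nat.le_of_succ_le hn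
    have hcd : n < answer_code.length := hn
    have hql : n < question_list.length := lt_of_lt_of_le hcd hlen
    have hzip : n < (answer_code.zip question_list).length := by
      simp [List.length_zip]; omega
    have hr : (PySem.List.pyRange 0 ((n + 1 : Nat) : Int) 1)
        = PySem.List.pyRange 0 (n : Int) 1 ++ [(n : Int)] := by
      push_cast
      exact PySem.List.pyRange_one_succ_right (by positivity)
    rw [hr, List.foldl_append, ih hn']
    have htake : ((answer_code.zip question_list).take (n + 1))
        = ((answer_code.zip question_list).take n) ++ [(answer_code.zip question_list)[n]] := by
      rw [List.take_add_one]
      simp [List.getElem?_eq_getElem hzip]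
    rw [htake, List.foldl_append]
    simp only [List.foldl_cons, List.foldl_nil]
    have hgz : (answer_code.zip question_list)[n] = (answer_code[n], question_list[n]) := by
      simp
    rw [hgz]
    unfold aStep zStep
    simp [PySem.List.pyGetD_natCast, List.getD_eq_getElem?_getD, List.getElem?_eq_getElem hcd,
      List.getElem?_eq_getElem hql]

lemma zFold_countP_white (question_list : List String) :
    ∀ (zs : List (String × String)) (acc : List String),
      (zs.foldl (zStep question_list) acc).countP (fun s => s == "white")
        = acc.countP (fun s => s == "white")
          + zs.countP (fun p => !(p.1 == p.2) && question_list.contains p.1) := by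
  intro zs
  induction zs with
  | nil => simp
  | cons p zs ih =>
    intro acc
    simp only [List.foldl_cons, ih, List.countP_cons]
    unfold zStep
    split_ifs <;> simp_all [List.countP_append] <;> omega

lemma zFold_countP_black (question_list : List String) :
    ∀ (zs : List (String × String)) (acc : List String),
      (zs.foldl (zStep question_list) acc).countP (fun s => !(s == "white"))
        = acc.countP (fun s => !(s == "white")) + zs.countP (fun p => p.1 == p.2) := by
  intro zs
  induction zs with
  | nil => simp
  | cons p zs ih =>
    intro acc
    simp only [List.foldl_cons, ih, List.countP_cons]
    unfold zStep
    split_ifs <;> simp_all [List.countP_append] <;> omega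

lemma pairCount (l : List String) :
    ∀ (w b : Int),
      l.foldl (fun (wb : Int × Int) pin => if pin == "white" then (wb.1 + 1, wb.2) else (wb.1, wb.2 + 1)) (w, b)
        = (w + (l.countP (fun s => s == "white") : Int), b + (l.countP (fun s => !(s == "white")) : Int)) := by
  induction l with
  | nil => intro w b; simp
  | cons x l ih =>
    intro w b
    simp only [List.foldl_cons, List.countP_cons]
    by_cases hx : (x == "white") = true
    · rw [if_pos hx, ih]
      simp only [hx, Bool.not_true, if_true, Prod.mk.injEq]
      constructor <;> push_cast <;> ring
    · rw [if_neg hx, ih]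
      rw [Bool.not_eq_true] at hx
      simp only [hx, Bool.not_false, if_true, Prod.mk.injEq]
      constructor <;> push_cast <;> ring

-- counting a property of the first component over a full-length zip equals counting over the list
lemma countP_fst_zip (P : String → Bool) :
    ∀ (cd ql : List String), cd.length ≤ ql.length →
      cd.countP P = (cd.zip ql).countP (fun p => P p.1) := by
  intro cd
  induction cd with
  | nil => intro ql _; simp
  | cons c cd ih =>
    intro ql hl
    cases ql with
    | nil => simp at hl
    | cons q ql =>
      simp only [List.zip_cons_cons, List.countP_cons]
      rw [ih ql (by simpa using hl)]

-- membership count over the zip splits into exact matches plus mismatched-but-present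
lemma countP_contains_split (ql : List String) :
    ∀ (zs : List (String × String)), (∀ p ∈ zs, p.2 ∈ ql) →
      zs.countP (fun p => ql.contains p.1)
        = zs.countP (fun p => p.1 == p.2)
          + zs.countP (fun p => !(p.1 == p.2) && ql.contains p.1) := by
  intro zs
  induction zs with
  | nil => intro _; simp
  | cons p zs ih =>
    intro h
    have hp : p.2 ∈ ql := h p (List.mem_cons_self)
    have hzs : ∀ q ∈ zs, q.2 ∈ ql := fun q hq => h q (List.mem_cons_of_mem _ hq)
    simp only [List.countP_cons, ih hzs]
    by_cases he : (p.1 == p.2) = true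
    · have : p.1 = p.2 := by simpa using he
      simp [this, hp]; omega
    · simp [he]; omega

-- ===== VERDICT (by name: the statement is the Claim_ definition above) =====
theorem npc_question_spec : Claim_equal_npc_question := by
  intro ql cd _ hpre
  unfold Pre_npc_question at hpre
  unfold Spec_npc_question npc_question npc_question_alt pc_question
  have hzlen : (cd.zip ql).length = cd.length := by
    simp [List.length_zip]; omega
  have hperm := PySem.List.sorted_perm
    (xs := (PySem.List.pyRange 0 (cd.length : Int) 1).foldl (aStep ql cd) [])
    (key := fun x : String => x) (rev := false)
  have hfold : (PySem.List.pyRange 0 (cd.length : Int) 1).foldl (aStep ql cd) []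
      = (cd.zip ql).foldl (zStep ql) [] := by
    have := aFold_eq_zFold_take ql cd hpre cd.length le_rfl
    simpa [List.take_of_length_le, hzlen] using this
  have hw := hperm.countP_eq (p := fun s => s == "white")
  have hb := hperm.countP_eq (p := fun s => !(s == "white"))
  rw [hfold] at hw hb
  rw [zFold_countP_white ql] at hw
  rw [zFold_countP_black ql] at hb
  simp only [List.countP_nil, Nat.zero_add] at hw hb
  -- identify A's fold with the step function and express both entries as counts
  rw [show (fun (list_check : List String) (i : Int) =>
        if PySem.List.pyGetD cd i "" == PySem.List.pyGetD ql i "" then list_check ++ ["black"]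
        else if ql.contains (PySem.List.pyGetD cd i "") then list_check ++ ["white"]
        else list_check) = aStep ql cd from rfl]
  rw [pairCount, hfold, hw, hb]
  -- B side: hits over code = hits over the zip, then split into black + white
  have hmem : ∀ p ∈ cd.zip ql, p.2 ∈ ql := by
    intro p hp
    exact (List.of_mem_zip hp).2
  have hhits : cd.countP (fun c => PySem.Set.contains (PySem.Set.ofList ql) c)
      = (cd.zip ql).countP (fun p => p.1 == p.2)
        + (cd.zip ql).countP (fun p => !(p.1 == p.2) && ql.contains p.1) := by
    have h1 : cd.countP (fun c => PySem.Set.contains (PySem.Set.ofList ql) c)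
        = cd.countP (fun c => ql.contains c) := by
      apply List.countP_congr
      intro c _
      simp [PySem.Set.mem_ofList]
    rw [h1, countP_fst_zip (fun c => ql.contains c) cd ql hpre,
      countP_contains_split ql (cd.zip ql) hmem]
  simp only [hhits, zero_add, Nat.cast_add, add_sub_cancel_left]
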